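-- pv_equiv track=rewrite | github.com/rhiannone74/orca | src/orca/where_am_I.py | _removeLeadingSpaces
-- ===== SOURCE A (Python) =====
-- def _removeLeadingSpaces(str):
--     """Returns a string with the leading space characters removed.
--     """
--
--     newStr = ""
--     leadingSpaces = True
--     for i in range(0, len(str)):
--         if str[i] == " ":
--             if leadingSpaces:
--                 continue
--         else:
--             leadingSpaces = False
--
--         newStr += str[i]
--
--     return newStr
-- ===== SOURCE B (Python) =====
-- def _removeLeadingSpaces(str):
--     """Returns a string with the leading space characters removed."""
--     for i, ch in enumerate(str):
--         if ch != " ":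
--             return str[i:]
--     return ""
-- ===== Notes on version B (the rewrite author's own statement) =====
-- stated objective: simpler
-- what changed: Instead of copying the string character by character with a leadingSpaces flag, B scans for the first non-space character and returns a single slice from there (empty string if all spaces).
import Mathlib
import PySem

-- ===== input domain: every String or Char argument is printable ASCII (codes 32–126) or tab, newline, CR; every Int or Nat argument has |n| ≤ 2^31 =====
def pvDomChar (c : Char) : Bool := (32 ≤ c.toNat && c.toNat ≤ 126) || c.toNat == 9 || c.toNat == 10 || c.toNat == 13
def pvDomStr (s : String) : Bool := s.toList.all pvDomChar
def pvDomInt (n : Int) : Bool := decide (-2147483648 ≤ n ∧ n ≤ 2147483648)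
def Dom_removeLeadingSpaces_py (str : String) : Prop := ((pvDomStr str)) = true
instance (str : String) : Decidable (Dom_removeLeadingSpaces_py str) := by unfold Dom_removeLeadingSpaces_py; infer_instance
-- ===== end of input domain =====

-- B replaces A's character-by-character copy (with a leadingSpaces flag) by a single
-- scan for the first non-space character followed by one slice; objective: simpler.


-- ===== PORT A =====
-- A's loop body: state is (newStr, leadingSpaces); iterating str[i] in order is
-- iterating the character list.
def removeLeadingSpacesStep (st : List Char × Bool) (c : Char) : List Char × Bool :=
  if c = ' ' then
    if st.2 then st else (st.1 ++ [c], st.2)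
  else (st.1 ++ [c], false)

def removeLeadingSpaces_py (str : String) : String :=
  String.mk (str.toList.foldl removeLeadingSpacesStep ([], true)).1

-- ===== PORT B =====
-- Source B's loop: walk to the first non-space character and return the slice from there
-- (returning the remaining suffix IS the slice str[i:]); all-spaces/empty gives "".
def removeLeadingSpacesScan : List Char → String
  | [] => ""
  | c :: cs => if c ≠ ' ' then String.mk (c :: cs) else removeLeadingSpacesScan cs

def removeLeadingSpaces_py_alt (str : String) : String :=
  removeLeadingSpacesScan str.toList

-- ===== PRECONDITION & SPEC =====
def Spec_removeLeadingSpaces_py (str : String) (out : String) : Prop := out = removeLeadingSpaces_py_alt str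
instance (str : String) (out : String) : Decidable (Spec_removeLeadingSpaces_py str out) := by unfold Spec_removeLeadingSpaces_py; infer_instance

-- ===== CLAIM (what is proved, stated in full; the proofs are below) =====
def Claim_equal_removeLeadingSpaces_py : Prop := ∀ (str : String), Dom_removeLeadingSpaces_py str → Spec_removeLeadingSpaces_py str (removeLeadingSpaces_py str)

-- ===== LEMMAS AND PROOFS =====

-- once leadingSpaces is False, A's loop appends every remaining character
theorem foldl_step_false (cs : List Char) (acc : List Char) :
    (cs.foldl removeLeadingSpacesStep (acc, false)).1 = acc ++ cs := by
  induction cs generalizing acc with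
  | nil => simp
  | cons c cs ih =>
      simp only [List.foldl_cons, removeLeadingSpacesStep]
      by_cases h : c = ' ' <;> simp [h, ih]

theorem foldl_step_true (cs : List Char) :
    String.mk (cs.foldl removeLeadingSpacesStep ([], true)).1 = removeLeadingSpacesScan cs := by
  induction cs with
  | nil => rfl
  | cons c cs ih =>
      simp only [List.foldl_cons, removeLeadingSpacesStep, removeLeadingSpacesScan]
      by_cases h : c = ' '
      · simp [h, ih]
      · simp [h, foldl_step_false]

-- ===== VERDICT (by name: the statement is the Claim_ definition above) =====
theorem removeLeadingSpaces_py_spec : Claim_equal_removeLeadingSpaces_py := by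
  intro str _
  unfold Spec_removeLeadingSpaces_py removeLeadingSpaces_py removeLeadingSpaces_py_alt
  exact foldl_step_true str.toList
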